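-- pv_equiv track=rewrite | github.com/Northbreez/skillbox | practical_work_7/task_3.py | max_user_number
-- ===== SOURCE A (Python) =====
-- def max_user_number(num):
--     max_num = -1
--     while num > 0:
--         digit = num % 10
--         if digit > max_num:
--             max_num = digit
--         num //= 10
--     return max_num
-- ===== SOURCE B (Python) =====
-- def max_user_number(num):
--     if num <= 0:
--         return -1
--     return max(int(c) for c in str(num))
-- ===== Notes on version B (the rewrite author's own statement) =====
-- stated objective: idiomatic
-- what changed: Replaces the arithmetic while/mod/floordiv digit-peeling loop with a single max over the decimal-string characters of the number, after a guard reproducing A's sentinel for non-positive input.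
import Mathlib
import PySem

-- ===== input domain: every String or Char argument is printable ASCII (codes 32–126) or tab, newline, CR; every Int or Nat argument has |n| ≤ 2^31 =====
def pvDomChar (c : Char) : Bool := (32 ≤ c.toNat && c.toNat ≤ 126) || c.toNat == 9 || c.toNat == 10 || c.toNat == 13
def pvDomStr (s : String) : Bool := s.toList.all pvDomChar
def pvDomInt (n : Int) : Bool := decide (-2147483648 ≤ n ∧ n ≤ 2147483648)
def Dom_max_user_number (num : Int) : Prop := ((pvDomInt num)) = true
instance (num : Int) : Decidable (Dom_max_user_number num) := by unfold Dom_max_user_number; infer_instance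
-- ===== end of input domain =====

-- B replaces A's while/mod/floordiv digit-peeling loop by a max over the decimal-string characters (idiomatic; same cost).

-- ===== PORT A =====
-- the while loop: peel digits with % 10 and //= 10, tracking the running maximum
def maxLoopA (num m : Int) : Int :=
  if _h : 0 < num then
    let digit := PySem.Int.mod num 10
    maxLoopA (PySem.Int.floordiv num 10) (if digit > m then digit else m)
  else m
termination_by num.toNat
decreasing_by
  rw [PySem.Int.floordiv_eq_ediv_of_pos (by norm_num)]
  omega

def max_user_number (num : Int) : Int := maxLoopA num (-1)

-- ===== PORT B =====
-- int(c) for a single character c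
def digitValB (c : Char) : Int := (PySem.Int.ofChars? [c]).getD 0

def max_user_number_alt (num : Int) : Int :=
  if num ≤ 0 then -1
  else
    match (PySem.Int.toChars num).map digitValB with
    | [] => -1  -- unreachable: str(num) is never empty (Python's max would raise here)
    | x :: xs => xs.foldl max x

-- ===== PRECONDITION & SPEC =====
def Spec_max_user_number (num : Int) (out : Int) : Prop := out = max_user_number_alt num
instance (num : Int) (out : Int) : Decidable (Spec_max_user_number num out) := by unfold Spec_max_user_number; infer_instance

-- ===== CLAIM (what is proved, stated in full; the proofs are below) =====
def Claim_equal_max_user_number : Prop := ∀ (num : Int), Dom_max_user_number num → Spec_max_user_number num (max_user_number num)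

-- ===== LEMMAS AND PROOFS =====

-- A's loop computes a left max-fold over the little-endian decimal digits of num.toNat
lemma maxLoopA_eq (num m : Int) :
    maxLoopA num m = ((Nat.digits 10 num.toNat).map (fun d : Nat => (d : Int))).foldl max m := by
  fun_induction maxLoopA num m with
  | case1 num m h dg ih =>
    have hd : Nat.digits 10 num.toNat = num.toNat % 10 :: Nat.digits 10 (num.toNat / 10) :=
      Nat.digits_def' (by norm_num) (by omega)
    have hfd : (PySem.Int.floordiv num 10).toNat = num.toNat / 10 := by
      rw [PySem.Int.floordiv_eq_ediv_of_pos (by norm_num)]; omega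
    have hmd : PySem.Int.mod num 10 = ((num.toNat % 10 : Nat) : Int) := by
      rw [PySem.Int.mod_eq_emod_of_pos (by norm_num)]; omega
    try simp only [dite_eq_ite] at ih
    rw [ih, hfd, hd]
    simp only [List.map, List.foldl]
    congr 1
    have hmd' : dg = ((num.toNat % 10 : Nat) : Int) := hmd
    rw [hmd']
    split_ifs <;> omega
  | case2 num m h =>
    have : num.toNat = 0 := by omega
    simp [this]

lemma toDigitsCore_eq (f : Nat) : ∀ (n : Nat) (l : List Char), 0 < n → n < f →
    Nat.toDigitsCore 10 f n l = ((Nat.digits 10 n).map Nat.digitChar).reverse ++ l := by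
  induction f with
  | zero => intro n l h hf; omega
  | succ f ih =>
    intro n l h hf
    have hd : Nat.digits 10 n = n % 10 :: Nat.digits 10 (n / 10) :=
      Nat.digits_def' (by norm_num) h
    simp only [Nat.toDigitsCore]
    by_cases h0 : n / 10 = 0
    · simp [h0, hd]
    · rw [if_neg h0, ih (n / 10) _ (by omega) (by omega), hd]
      simp

lemma digitValB_digitChar (d : Nat) (hd : d < 10) : digitValB (Nat.digitChar d) = (d : Int) := by
  interval_cases d <;> decide

-- ===== VERDICT (by name: the statement is the Claim_ definition above) =====
theorem max_user_number_spec : Claim_equal_max_user_number := by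
  intro num _
  unfold Spec_max_user_number max_user_number max_user_number_alt
  by_cases hle : num ≤ 0
  · rw [if_pos hle]
    unfold maxLoopA
    rw [dif_neg (by omega)]
  · rw [if_neg hle]
    have hpos : 0 < num := by omega
    have hn : 0 < num.toNat := by omega
    have htc : PySem.Int.toChars num
        = ((Nat.digits 10 num.toNat).map Nat.digitChar).reverse := by
      simp only [PySem.Int.toChars, if_neg (by omega : ¬ num < 0)]
      exact toDigitsCore_eq (num.toNat + 1) num.toNat [] hn (by omega) |>.trans (by simp)
    have hall : ∀ d ∈ Nat.digits 10 num.toNat, d < 10 :=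
      fun d hd => Nat.digits_lt_base (by norm_num) hd
    have hmap : (PySem.Int.toChars num).map digitValB
        = ((Nat.digits 10 num.toNat).map (fun d : Nat => (d : Int))).reverse := by
      rw [htc, List.map_reverse, List.map_map]
      congr 1
      refine List.map_congr_left fun d hd => ?_
      simp only [Function.comp_apply]
      exact digitValB_digitChar d (hall d hd)
    have hLne : ((Nat.digits 10 num.toNat).map (fun d : Nat => (d : Int))).reverse ≠ [] := by
      simp only [ne_eq, List.reverse_eq_nil_iff, List.map_eq_nil_iff]
      exact Nat.digits_ne_nil_iff_ne_zero.mpr (by omega)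
    rw [maxLoopA_eq, hmap]
    rcases hR : ((Nat.digits 10 num.toNat).map (fun d : Nat => (d : Int))).reverse with _ | ⟨x, xs⟩
    · exact absurd hR hLne
    · have hx : 0 ≤ x := by
        have hxm : x ∈ (Nat.digits 10 num.toNat).map (fun d : Nat => (d : Int)) := by
          have : x ∈ ((Nat.digits 10 num.toNat).map (fun d : Nat => (d : Int))).reverse := by
            rw [hR]; exact List.mem_cons_self
          simpa using this
        obtain ⟨d, _, rfl⟩ := List.mem_map.mp hxm
        exact Int.natCast_nonneg d
      have hrev : ((Nat.digits 10 num.toNat).map (fun d : Nat => (d : Int))).foldl max (-1)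
          = (((Nat.digits 10 num.toNat).map (fun d : Nat => (d : Int))).reverse).foldl max (-1) := by
        rw [List.foldl_reverse]
        simp only [max_comm]
        exact List.foldl_eq_foldr _ _
      rw [hrev, hR]
      simp only [List.foldl]
      congr 1
      omega
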